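-- pv_equiv track=rewrite | github.com/openharmony/drivers_framework | tools/hdf_dev_eco_tool/command_line/driver_add/liteos/mk_file_add_config.py | find_makefile_file_end_index
-- ===== SOURCE A (Python) =====
-- def find_makefile_file_end_index(date_lines, model_name):
--     file_end_flag = "include $(HDF_DRIVER)"
--     end_index = 0
--     if model_name == "sensor":
--         model_dir_name = ("FRAMEWORKS_%s_ROOT" % model_name.upper())
--     else:
--         model_dir_name = ("%s_ROOT_DIR" % model_name.upper())
--     model_dir_value = ""
--
--     for index, line in enumerate(date_lines):
--         if line.startswith("#"):
--             continue
--         elif line.strip().startswith(file_end_flag):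
--             end_index = index
--         elif line.strip().startswith(model_dir_name):
--             model_dir_value = line.split("=")[-1].strip()
--         else:
--             continue
--     result_tuple = (end_index, model_dir_name, model_dir_value)
--     return result_tuple
-- ===== SOURCE B (Python) =====
-- def find_makefile_file_end_index(date_lines, model_name):
--     if model_name == "sensor":
--         model_dir_name = "FRAMEWORKS_%s_ROOT" % model_name.upper()
--     else:
--         model_dir_name = "%s_ROOT_DIR" % model_name.upper()
--
--     end_index = 0
--     for index in range(len(date_lines) - 1, -1, -1):
--         line = date_lines[index]
--         if not line.startswith("#") and line.strip().startswith("include $(HDF_DRIVER)"):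
--             end_index = index
--             break
--
--     model_dir_value = ""
--     for line in reversed(date_lines):
--         if not line.startswith("#") and line.strip().startswith(model_dir_name):
--             model_dir_value = line.split("=")[-1].strip()
--             break
--
--     return (end_index, model_dir_name, model_dir_value)
-- ===== Notes on version B (the rewrite author's own statement) =====
-- stated objective: alternative
-- what changed: Replaces A's single accumulating forward pass with two independent reverse scans that break at the first (i.e. last) matching line for end_index and for model_dir_value.
import Mathlib
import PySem

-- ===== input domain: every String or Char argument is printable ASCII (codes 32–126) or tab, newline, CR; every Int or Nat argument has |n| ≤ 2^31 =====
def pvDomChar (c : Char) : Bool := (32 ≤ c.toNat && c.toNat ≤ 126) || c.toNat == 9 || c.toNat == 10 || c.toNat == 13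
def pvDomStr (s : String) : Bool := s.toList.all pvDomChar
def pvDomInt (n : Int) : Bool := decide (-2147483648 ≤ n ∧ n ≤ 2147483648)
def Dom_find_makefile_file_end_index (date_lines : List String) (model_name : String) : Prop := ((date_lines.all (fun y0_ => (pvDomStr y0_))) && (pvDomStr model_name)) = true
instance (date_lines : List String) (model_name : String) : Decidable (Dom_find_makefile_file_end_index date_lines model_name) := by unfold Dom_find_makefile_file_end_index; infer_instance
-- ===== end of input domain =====

-- B replaces A's single accumulating forward pass with two independent
-- reverse scans that break at the last matching line ("alternative").

-- ===== PORT A =====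
-- shared helpers (same computation in A and B): model_dir_name and line.split("=")[-1].strip()
def pvModelDirName (model_name : String) : String :=
  if model_name == "sensor" then "FRAMEWORKS_" ++ PySem.Str.upper model_name ++ "_ROOT"
  else PySem.Str.upper model_name ++ "_ROOT_DIR"

def pvLastField (line : String) : String :=
  PySem.Str.strip (((PySem.Str.split? line "=").getD []).getLastD "")

def pvStepA (model_dir_name : String) (st : Int × String) (p : Int × String) : Int × String :=
  if PySem.Str.startswith p.2 "#" then st
  else if PySem.Str.startswith (PySem.Str.strip p.2) "include $(HDF_DRIVER)" then (p.1, st.2)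
  else if PySem.Str.startswith (PySem.Str.strip p.2) model_dir_name then (st.1, pvLastField p.2)
  else st

def find_makefile_file_end_index (date_lines : List String) (model_name : String) : Int × String × String :=
  let model_dir_name := pvModelDirName model_name
  let st := (PySem.List.enumerate date_lines).foldl (pvStepA model_dir_name) (0, "")
  (st.1, model_dir_name, st.2)

-- ===== PORT B =====
def pvFindEnd : List (Int × String) → Int
  | [] => 0
  | (i, line) :: rest =>
    if (!PySem.Str.startswith line "#")
        && PySem.Str.startswith (PySem.Str.strip line) "include $(HDF_DRIVER)" then i
    else pvFindEnd rest

def pvFindVal (model_dir_name : String) : List String → String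
  | [] => ""
  | line :: rest =>
    if (!PySem.Str.startswith line "#")
        && PySem.Str.startswith (PySem.Str.strip line) model_dir_name then pvLastField line
    else pvFindVal model_dir_name rest

def find_makefile_file_end_index_alt (date_lines : List String) (model_name : String) : Int × String × String :=
  let model_dir_name := pvModelDirName model_name
  (pvFindEnd (PySem.List.enumerate date_lines).reverse,
   model_dir_name,
   pvFindVal model_dir_name date_lines.reverse)

-- ===== PRECONDITION & SPEC =====
def Spec_find_makefile_file_end_index (date_lines : List String) (model_name : String) (out : Int × String × String) : Prop := out = find_makefile_file_end_index_alt date_lines model_name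
instance (date_lines : List String) (model_name : String) (out : Int × String × String) : Decidable (Spec_find_makefile_file_end_index date_lines model_name out) := by unfold Spec_find_makefile_file_end_index; infer_instance

-- ===== CLAIM (what is proved, stated in full; the proofs are below) =====
def Claim_equal_find_makefile_file_end_index : Prop := ∀ (date_lines : List String) (model_name : String), Dom_find_makefile_file_end_index date_lines model_name → Spec_find_makefile_file_end_index date_lines model_name (find_makefile_file_end_index date_lines model_name)

-- ===== LEMMAS AND PROOFS =====
def pvMatchE (p : Int × String) : Bool :=
  (!PySem.Str.startswith p.2 "#")
    && PySem.Str.startswith (PySem.Str.strip p.2) "include $(HDF_DRIVER)"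

def pvMatchV (m : String) (line : String) : Bool :=
  (!PySem.Str.startswith line "#")
    && PySem.Str.startswith (PySem.Str.strip line) m

-- upperChar never produces a lowercase 'i'
theorem upperChar_ne_i (c : Char) : PySem.Chars.upperChar c ≠ 'i' := by
  unfold PySem.Chars.upperChar PySem.Chars.islower
  split_ifs with h
  · intro heq
    have h' : ('a' ≤ c ∧ c ≤ 'z') := by
      simpa [Bool.and_eq_true, decide_eq_true_eq] using h
    have hlo : 97 ≤ c.toNat := h'.1
    have hhi : c.toNat ≤ 122 := h'.2
    have h2 := congrArg Char.toNat heq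
    rw [Char.toNat_ofNat, if_pos (Or.inl (by omega : c.toNat - 32 < 0xd800))] at h2
    have hi : ('i' : Char).toNat = 105 := by decide
    omega
  · intro heq
    subst heq
    exact h (by decide)

-- pvModelDirName always starts with a character ≠ 'i'
theorem modelDirName_head (mn : String) :
    ∃ c cs, (pvModelDirName mn).toList = c :: cs ∧ c ≠ 'i' := by
  unfold pvModelDirName
  split_ifs with h
  · exact ⟨'F', ("RAMEWORKS_" ++ PySem.Str.upper mn ++ "_ROOT").toList, by
      simp [String.toList_append], by decide⟩
  · rcases hc : mn.toList with _ | ⟨c, cs⟩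
    · refine ⟨'_', "ROOT_DIR".toList, ?_, by decide⟩
      simp [String.toList_append, PySem.Str.toList_upper, PySem.Chars.upper, hc]
    · refine ⟨PySem.Chars.upperChar c,
        PySem.Chars.upper cs ++ "_ROOT_DIR".toList, ?_, upperChar_ne_i c⟩
      simp [String.toList_append, PySem.Str.toList_upper, PySem.Chars.upper, hc]

-- a string cannot start with both the end flag and the model dir name
theorem disjoint_flags (mn : String) (s : List Char)
    (h1 : PySem.Chars.startswith s "include $(HDF_DRIVER)".toList = true)
    (h2 : PySem.Chars.startswith s (pvModelDirName mn).toList = true) : False := by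
  rw [PySem.Chars.startswith_iff] at h1 h2
  obtain ⟨c, cs, hm, hne⟩ := modelDirName_head mn
  obtain ⟨t1, ht1⟩ := h1
  obtain ⟨t2, ht2⟩ := h2
  rw [hm] at ht2
  have h4 := ht1.trans ht2.symm
  rw [show "include $(HDF_DRIVER)".toList
      = 'i' :: "nclude $(HDF_DRIVER)".toList from rfl] at h4
  simp only [List.cons_append, List.cons.injEq] at h4
  exact hne h4.1.symm

theorem pvFindEnd_eq : ∀ (l : List (Int × String)),
    pvFindEnd l = ((l.find? pvMatchE).map (fun p => p.1)).getD 0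
  | [] => rfl
  | (i, line) :: rest => by
    show (if pvMatchE (i, line) then i else pvFindEnd rest) = _
    rw [List.find?_cons]
    cases h : pvMatchE (i, line) <;> simp [pvFindEnd_eq rest]

theorem pvFindVal_eq (m : String) : ∀ (l : List String),
    pvFindVal m l = ((l.find? (pvMatchV m)).map pvLastField).getD ""
  | [] => rfl
  | line :: rest => by
    show (if pvMatchV m line then pvLastField line else pvFindVal m rest) = _
    rw [List.find?_cons]
    cases h : pvMatchV m line <;> simp [pvFindVal_eq m rest]

theorem stepA_fst (m : String) (st p : Int × String) :
    (pvStepA m st p).1 = if pvMatchE p then p.1 else st.1 := by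
  unfold pvStepA pvMatchE
  split_ifs with h1 h2 h3 <;> simp_all

theorem stepA_snd (mn : String) (st p : Int × String) :
    (pvStepA (pvModelDirName mn) st p).2
      = if pvMatchV (pvModelDirName mn) p.2 then pvLastField p.2 else st.2 := by
  unfold pvStepA pvMatchV
  by_cases h1 : PySem.Chars.startswith p.2.toList ['#'] = true
  · simp [h1]
  · by_cases h2 : PySem.Chars.startswith (PySem.Chars.strip p.2.toList)
        ['i','n','c','l','u','d','e',' ','$','(','H','D','F','_','D','R','I','V','E','R',')'] = true
    · have h3 : PySem.Chars.startswith (PySem.Chars.strip p.2.toList)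
          (pvModelDirName mn).toList = false := by
        cases h3 : PySem.Chars.startswith (PySem.Chars.strip p.2.toList) (pvModelDirName mn).toList
        · rfl
        · exact (disjoint_flags mn _ h2 h3).elim
      simp [h1, h2, h3]
    · by_cases h3 : PySem.Chars.startswith (PySem.Chars.strip p.2.toList)
          (pvModelDirName mn).toList = true
      · simp [h1, h2, h3]
      · simp [h1, h2, h3]

theorem foldl_fst (m : String) (ps : List (Int × String)) (st : Int × String) :
    (ps.foldl (pvStepA m) st).1
      = ((ps.reverse.find? pvMatchE).map (fun p => p.1)).getD st.1 := by
  induction ps generalizing st with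
  | nil => rfl
  | cons p rest ih =>
    simp only [List.foldl_cons, List.reverse_cons, List.find?_append, ih]
    cases hf : rest.reverse.find? pvMatchE with
    | some q => simp
    | none =>
      simp only [Option.none_or]
      by_cases h : pvMatchE p = true
      · simp [List.find?, h, stepA_fst]
      · simp [List.find?, h, stepA_fst]

theorem foldl_snd (mn : String) (ps : List (Int × String)) (st : Int × String) :
    (ps.foldl (pvStepA (pvModelDirName mn)) st).2
      = ((ps.reverse.find? (fun p => pvMatchV (pvModelDirName mn) p.2)).map
          (fun p => pvLastField p.2)).getD st.2 := by
  induction ps generalizing st with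
  | nil => rfl
  | cons p rest ih =>
    simp only [List.foldl_cons, List.reverse_cons, List.find?_append, ih]
    cases hf : rest.reverse.find? (fun p => pvMatchV (pvModelDirName mn) p.2) with
    | some q => simp
    | none =>
      simp only [Option.none_or]
      by_cases h : pvMatchV (pvModelDirName mn) p.2 = true
      · simp [List.find?, h, stepA_snd]
      · simp [List.find?, h, stepA_snd]

theorem find_val_bridge (m : String) (dl : List String) :
    pvFindVal m dl.reverse
      = (((PySem.List.enumerate dl).reverse.find? (fun p => pvMatchV m p.2)).map
          (fun p => pvLastField p.2)).getD "" := by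
  have hmap : dl.reverse = (PySem.List.enumerate dl).reverse.map (fun p => p.2) := by
    rw [List.map_reverse, PySem.List.map_snd_enumerate]
  rw [pvFindVal_eq, hmap, List.find?_map, Option.map_map]
  rfl

-- ===== VERDICT (by name: the statement is the Claim_ definition above) =====
theorem find_makefile_file_end_index_spec : Claim_equal_find_makefile_file_end_index := by
  intro dl mn _
  unfold Spec_find_makefile_file_end_index find_makefile_file_end_index find_makefile_file_end_index_alt
  refine Prod.ext ?_ (Prod.ext rfl ?_)
  · simp only [foldl_fst, pvFindEnd_eq]
  · simp only [foldl_snd, find_val_bridge]
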